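-- pv_equiv track=rewrite | github.com/jrodrigopuca/puntos | tools/generate_sprites.py | _row_bounds
-- ===== SOURCE A (Python) =====
-- T = (0, 0, 0, 0)  # Transparent
--
-- def _row_bounds(grid, y):
--     """Retorna (x_min, x_max) de píxeles no-transparentes, o (None, None)."""
--     x_min = x_max = None
--     for x in range(len(grid[y])):
--         if grid[y][x] != T:
--             if x_min is None:
--                 x_min = x
--             x_max = x
--     return x_min, x_max
-- ===== SOURCE B (Python) =====
-- T = (0, 0, 0, 0)  # Transparent
--
-- def _row_bounds(grid, y):
--     """Retorna (x_min, x_max) de pixeles no-transparentes, o (None, None)."""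
--     row = grid[y]
--     n = len(row)
--     x_min = None
--     for x in range(n):
--         if row[x] != T:
--             x_min = x
--             break
--     x_max = None
--     for x in reversed(range(n)):
--         if row[x] != T:
--             x_max = x
--             break
--     return x_min, x_max
-- ===== Notes on version B (the rewrite author's own statement) =====
-- stated objective: alternative
-- what changed: Replaces the single full-row pass that keeps updating both bounds with two early-terminating scans: a forward scan breaking at the first non-transparent pixel and a backward scan breaking at the last one.
import Mathlib
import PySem

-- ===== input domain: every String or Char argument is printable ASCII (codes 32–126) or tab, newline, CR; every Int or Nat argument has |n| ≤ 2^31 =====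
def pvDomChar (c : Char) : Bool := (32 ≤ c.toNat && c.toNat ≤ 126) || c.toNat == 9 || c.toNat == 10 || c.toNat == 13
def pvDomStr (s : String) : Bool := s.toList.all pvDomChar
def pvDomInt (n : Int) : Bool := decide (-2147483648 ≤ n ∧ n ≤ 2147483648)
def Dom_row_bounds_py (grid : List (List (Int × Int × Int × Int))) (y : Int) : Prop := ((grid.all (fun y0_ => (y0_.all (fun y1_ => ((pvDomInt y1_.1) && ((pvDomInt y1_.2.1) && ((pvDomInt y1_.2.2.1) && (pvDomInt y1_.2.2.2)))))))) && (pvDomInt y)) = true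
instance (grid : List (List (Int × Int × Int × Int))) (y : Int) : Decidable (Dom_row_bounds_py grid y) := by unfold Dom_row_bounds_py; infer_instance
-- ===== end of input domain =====

-- B replaces A's single full pass over the row with two early-terminating scans (forward for x_min,
-- backward for x_max); alternative decomposition, same worst-case cost.


-- ===== PORT A =====
-- A: one pass over range(len(grid[y])), updating x_min (first hit) and x_max (every hit).
def row_bounds_py (grid : List (List (Int × Int × Int × Int))) (y : Int) : Option Int × Option Int :=
  let row := PySem.List.pyGetD grid y []
  (PySem.List.pyRange 0 (PySem.List.len row) 1).foldl
    (fun (acc : Option Int × Option Int) x =>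
      if PySem.List.pyGetD row x (0, 0, 0, 0) ≠ ((0 : Int), (0 : Int), (0 : Int), (0 : Int)) then
        ((if acc.1 = none then some x else acc.1), some x)
      else acc)
    (none, none)

-- ===== PORT B =====
-- forward scan with break: index of the first non-transparent pixel
def pvFindFwd : List (Int × Int × Int × Int) → Int → Option Int
  | [], _ => none
  | p :: ps, i => if p ≠ ((0 : Int), (0 : Int), (0 : Int), (0 : Int)) then some i else pvFindFwd ps (i + 1)

-- backward scan with break, written as a forward scan of the reversed row with a descending index
def pvFindBwd : List (Int × Int × Int × Int) → Int → Option Int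
  | [], _ => none
  | p :: ps, i => if p ≠ ((0 : Int), (0 : Int), (0 : Int), (0 : Int)) then some i else pvFindBwd ps (i - 1)

def row_bounds_py_alt (grid : List (List (Int × Int × Int × Int))) (y : Int) : Option Int × Option Int :=
  let row := PySem.List.pyGetD grid y []
  (pvFindFwd row 0, pvFindBwd row.reverse (PySem.List.len row - 1))

-- ===== PRECONDITION & SPEC =====
-- Pre_: grid[y] must not raise IndexError
def Pre_row_bounds_py (grid : List (List (Int × Int × Int × Int))) (y : Int) : Prop :=
  PySem.Raise.InRange grid.length y
instance (grid : List (List (Int × Int × Int × Int))) (y : Int) : Decidable (Pre_row_bounds_py grid y) := by unfold Pre_row_bounds_py; infer_instance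
def pvWitness_row_bounds_py : (List (List (Int × Int × Int × Int))) × Int := ([[(1, 2, 3, 4), (0, 0, 0, 0)]], 0)

def Spec_row_bounds_py (grid : List (List (Int × Int × Int × Int))) (y : Int) (out : Option Int × Option Int) : Prop := out = row_bounds_py_alt grid y
instance (grid : List (List (Int × Int × Int × Int))) (y : Int) (out : Option Int × Option Int) : Decidable (Spec_row_bounds_py grid y out) := by unfold Spec_row_bounds_py; infer_instance

-- ===== CLAIM (what is proved, stated in full; the proofs are below) =====
def Claim_equal_row_bounds_py : Prop := ∀ (grid : List (List (Int × Int × Int × Int))) (y : Int), Dom_row_bounds_py grid y → Pre_row_bounds_py grid y → Spec_row_bounds_py grid y (row_bounds_py grid y)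

-- ===== LEMMAS AND PROOFS =====

-- the step function of A's loop, with the pixel supplied directly
def pvStep (acc : Option Int × Option Int) (x : Int) (p : Int × Int × Int × Int) : Option Int × Option Int :=
  if p ≠ ((0 : Int), (0 : Int), (0 : Int), (0 : Int)) then
    ((if acc.1 = none then some x else acc.1), some x)
  else acc

-- A's loop over an enumerated row
def pvLoop (l : List (Int × (Int × Int × Int × Int))) (acc : Option Int × Option Int) :
    Option Int × Option Int :=
  l.foldl (fun acc jp => pvStep acc jp.1 jp.2) acc

lemma pvLoop_cons (s : Int) (p : Int × Int × Int × Int)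
    (l : List (Int × (Int × Int × Int × Int))) (acc : Option Int × Option Int) :
    pvLoop ((s, p) :: l) acc = pvLoop l (pvStep acc s p) := rfl

lemma pvLoop_append (l₁ l₂ : List (Int × (Int × Int × Int × Int))) (acc : Option Int × Option Int) :
    pvLoop (l₁ ++ l₂) acc = pvLoop l₂ (pvLoop l₁ acc) := List.foldl_append

lemma pvFold_eq_enum (row : List (Int × Int × Int × Int)) :
    (PySem.List.pyRange 0 (PySem.List.len row) 1).foldl
      (fun (acc : Option Int × Option Int) x =>
        if PySem.List.pyGetD row x (0, 0, 0, 0) ≠ ((0 : Int), (0 : Int), (0 : Int), (0 : Int)) then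
          ((if acc.1 = none then some x else acc.1), some x)
        else acc)
      (none, none)
    = pvLoop (PySem.List.enumerate row 0) (none, none) := by
  unfold pvLoop
  rw [PySem.List.enumerate_eq_map_pyRange row (0, 0, 0, 0), List.foldl_map]
  simp [pvStep, PySem.List.len_eq]

lemma pvFold_fst (row : List (Int × Int × Int × Int)) :
    ∀ (s : Int) (a b : Option Int),
      (pvLoop (PySem.List.enumerate row s) (a, b)).1
        = (match a with | some v => some v | none => pvFindFwd row s) := by
  induction row with
  | nil => intro s a b; cases a <;> simp [PySem.List.enumerate, pvLoop, pvFindFwd]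
  | cons p ps ih =>
    intro s a b
    rw [PySem.List.enumerate_cons, pvLoop_cons]
    by_cases hp : p = ((0 : Int), (0 : Int), (0 : Int), (0 : Int))
    · rw [show pvStep (a, b) s p = (a, b) by simp [pvStep, hp], ih]
      cases a <;> simp [pvFindFwd, hp]
    · rw [show pvStep (a, b) s p = ((if a = none then some s else a), some s) by
        simp [pvStep, hp]]
      cases a <;> simp [pvFindFwd, hp, ih]

lemma pvFold_snd (row : List (Int × Int × Int × Int)) :
    ∀ (s : Int) (a b : Option Int),
      (pvLoop (PySem.List.enumerate row s) (a, b)).2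
        = (match pvFindBwd row.reverse (s + row.length - 1) with
           | some v => some v | none => b) := by
  induction row using List.reverseRecOn with
  | nil => intro s a b; simp [PySem.List.enumerate, pvLoop, pvFindBwd]
  | append_singleton ps p ih =>
    intro s a b
    rw [PySem.List.enumerate_append, pvLoop_append]
    simp only [List.reverse_append, List.reverse_singleton, List.singleton_append,
      List.length_append, List.length_singleton, PySem.List.enumerate, pvLoop_cons, pvFindBwd]
    by_cases hp : p = ((0 : Int), (0 : Int), (0 : Int), (0 : Int))
    · rw [show pvStep (pvLoop (PySem.List.enumerate ps s) (a, b)) (s + ps.length) p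
            = pvLoop (PySem.List.enumerate ps s) (a, b) from by simp [pvStep, hp]]
      rw [if_neg (by simp [hp])]
      have hidx : s + ((ps.length : Int) + 1) - 1 - 1 = s + (ps.length : Int) - 1 := by ring
      simp only [pvLoop, List.foldl_nil]
      push_cast
      rw [hidx]
      exact ih s a b
    · rw [show pvStep (pvLoop (PySem.List.enumerate ps s) (a, b)) (s + ps.length) p
            = ((if (pvLoop (PySem.List.enumerate ps s) (a, b)).1 = none
                 then some (s + (ps.length : Int))
                 else (pvLoop (PySem.List.enumerate ps s) (a, b)).1),
               some (s + (ps.length : Int))) from by simp [pvStep, hp]]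
      rw [if_pos hp]
      simp only [pvLoop, List.foldl_nil]
      push_cast
      congr 1
      ring

-- ===== VERDICT (by name: the statement is the Claim_ definition above) =====
theorem row_bounds_py_spec : Claim_equal_row_bounds_py := by
  intro grid y _ _
  unfold Spec_row_bounds_py row_bounds_py row_bounds_py_alt
  set row := PySem.List.pyGetD grid y [] with hrow
  rw [pvFold_eq_enum row]
  refine Prod.ext ?_ ?_
  · rw [pvFold_fst row 0 none none]
  · rw [pvFold_snd row 0 none none]
    simp only [PySem.List.len_eq, zero_add]
    cases pvFindBwd row.reverse ((row.length : Int) - 1) <;> rfl
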